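-- pv_equiv track=rewrite | github.com/kartikeya-git/Schrodinger-Equation-Solver | Schrodinger.py | potential_matrix
-- ===== SOURCE A (Python) =====
-- def matrix(n):
--     L = []
--     for i in range(n):
--         l = []
--         for i in range(n):
--             l.append(0)
--         L.append(l)
--     return L
--
-- def potential_matrix(V):
--     n = len(V)
--     l = matrix(n)
--     for i in range(n):
--         for j in range(n):
--
--             if i == j:
--                 l[i][j] = V[i]
--     return l
-- ===== SOURCE B (Python) =====
-- def potential_matrix(V):
--     n = len(V)
--     return [[0] * i + [V[i]] + [0] * (n - 1 - i) for i in range(n)]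
-- ===== Notes on version B (the rewrite author's own statement) =====
-- stated objective: simpler
-- what changed: B never allocates a zero matrix or assigns into it: it constructs each row i directly as the concatenation of i zeros, the potential entry V(i), and n-1-i zeros in one comprehension, replacing A's allocate-then-scan-every-cell-and-test-i==j mutation strategy.
import Mathlib
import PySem

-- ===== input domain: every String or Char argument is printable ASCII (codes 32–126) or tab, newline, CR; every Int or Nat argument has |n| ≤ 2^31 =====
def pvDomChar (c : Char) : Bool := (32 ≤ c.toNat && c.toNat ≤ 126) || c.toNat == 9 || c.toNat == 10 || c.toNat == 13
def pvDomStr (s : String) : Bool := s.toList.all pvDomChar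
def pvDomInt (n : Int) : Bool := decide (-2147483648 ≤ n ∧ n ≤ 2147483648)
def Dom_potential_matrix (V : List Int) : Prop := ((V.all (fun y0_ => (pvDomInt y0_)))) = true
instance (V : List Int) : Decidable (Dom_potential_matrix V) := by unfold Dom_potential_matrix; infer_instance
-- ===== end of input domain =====

-- B builds each row i directly as a concatenation of zeros around the potential entry,
-- with no zero-matrix allocation and no in-place assignment (simpler decomposition).
-- ===== PORT A =====
-- helper `matrix(n)` from A: build the n x n zero matrix by nested append loops
def pvMatrixA (n : Nat) : List (List Int) :=
  (List.range n).foldl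
    (fun L _ => L ++ [(List.range n).foldl (fun l _ => l ++ [(0 : Int)]) []]) []

def potential_matrix (V : List Int) : List (List Int) :=
  let n := V.length
  (List.range n).foldl
    (fun l i =>
      (List.range n).foldl
        (fun l j =>
          if i = j then l.modify i (fun row => row.set j (V.getD i 0)) else l)
        l)
    (pvMatrixA n)

-- ===== PORT B =====
def potential_matrix_alt (V : List Int) : List (List Int) :=
  let n := V.length
  (List.range n).map
    (fun i => List.replicate i (0 : Int) ++ [V.getD i 0] ++ List.replicate (n - 1 - i) (0 : Int))

-- ===== PRECONDITION & SPEC =====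
def Spec_potential_matrix (V : List Int) (out : List (List Int)) : Prop := out = potential_matrix_alt V
instance (V : List Int) (out : List (List Int)) : Decidable (Spec_potential_matrix V out) := by unfold Spec_potential_matrix; infer_instance

-- ===== CLAIM (what is proved, stated in full; the proofs are below) =====
def Claim_equal_potential_matrix : Prop := ∀ (V : List Int), Dom_potential_matrix V → Spec_potential_matrix V (potential_matrix V)

-- ===== LEMMAS AND PROOFS =====
-- appending a constant n times is List.replicate
theorem pv_foldl_append_const {α : Type} (x : α) (n : Nat) (acc : List α) :
    (List.range n).foldl (fun L _ => L ++ [x]) acc = acc ++ List.replicate n x := by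
  induction n generalizing acc with
  | zero => simp
  | succ n ih =>
      simp [List.range_succ, List.foldl_append, ih, List.replicate_succ']

theorem pvMatrixA_eq (n : Nat) :
    pvMatrixA n = List.replicate n (List.replicate n (0 : Int)) := by
  simp only [pvMatrixA]
  rw [pv_foldl_append_const, pv_foldl_append_const]
  simp

-- a fold that acts only when j = i is identity if i is out of range …
theorem pv_foldl_ite_id {α : Type} (g : α → Nat → α) (i n : Nat) (h : n ≤ i) (l : α) :
    (List.range n).foldl (fun a j => if i = j then g a j else a) l = l := by
  induction n generalizing l with
  | zero => simp
  | succ n ih =>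
      have hne : i ≠ n := by omega
      simp [List.range_succ, List.foldl_append, ih (by omega), hne]

-- … and applies g exactly once if i < n
theorem pv_foldl_ite_eq {α : Type} (g : α → Nat → α) (i n : Nat) (h : i < n) (l : α) :
    (List.range n).foldl (fun a j => if i = j then g a j else a) l = g l i := by
  induction n generalizing l with
  | zero => omega
  | succ n ih =>
      rcases Nat.lt_or_ge i n with hi | hi
      · have hne : i ≠ n := by omega
        simp [List.range_succ, List.foldl_append, ih hi, hne]
      · have hie : i = n := by omega
        subst hie
        rw [List.range_succ, List.foldl_append, pv_foldl_ite_id g i i le_rfl]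
        simp

-- folding `modify i (g i)` over range n, read back through getElem?
theorem pv_fold_modify_get? {α : Type} (g : Nat → α → α) (n : Nat) (l0 : List α) (k : Nat) :
    ((List.range n).foldl (fun l i => l.modify i (g i)) l0)[k]? =
      if k < n then (l0[k]?).map (g k) else l0[k]? := by
  induction n generalizing l0 with
  | zero => simp
  | succ n ih =>
      rw [List.range_succ, List.foldl_append]
      simp only [List.foldl_cons, List.foldl_nil, List.getElem?_modify, ih]
      by_cases h2 : k = n
      · subst h2
        simp
      · have hnk : n ≠ k := fun h => h2 h.symm
        by_cases h1 : k < n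
        · have : k < n + 1 := by omega
          cases h : l0[k]? <;> simp [h1, this, hnk]
        · have : ¬ k < n + 1 := by omega
          cases h : l0[k]? <;> simp [h1, this, hnk]

-- setting index i of a zero row of length n yields the concatenation form
theorem pv_set_replicate (n i : Nat) (v : Int) (h : i < n) :
    (List.replicate n (0 : Int)).set i v =
      List.replicate i (0 : Int) ++ [v] ++ List.replicate (n - 1 - i) (0 : Int) := by
  induction i generalizing n with
  | zero =>
      cases n with
      | zero => omega
      | succ m => simp [List.replicate_succ]
  | succ i ih =>
      cases n with
      | zero => omega
      | succ m =>
          have h2 : m + 1 - 1 - (i + 1) = m - 1 - i := by omega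
          simp only [List.replicate_succ, List.set_cons_succ, List.cons_append, h2]
          simp [ih m (by omega)]

-- ===== VERDICT (by name: the statement is the Claim_ definition above) =====
theorem potential_matrix_spec : Claim_equal_potential_matrix := by
  intro V _
  unfold Spec_potential_matrix potential_matrix potential_matrix_alt
  simp only [pvMatrixA_eq]
  have hA :
      (List.range V.length).foldl
        (fun l i =>
          (List.range V.length).foldl
            (fun l j => if i = j then l.modify i (fun row => row.set j (V.getD i 0)) else l) l)
        (List.replicate V.length (List.replicate V.length (0 : Int)))
      = (List.range V.length).foldl
          (fun l i => l.modify i (fun row => row.set i (V.getD i 0)))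
          (List.replicate V.length (List.replicate V.length (0 : Int))) := by
    refine PySem.List.foldl_congr_mem _ _ _ _ ?_
    intro acc i hi
    exact pv_foldl_ite_eq (fun l j => l.modify i (fun row => row.set j (V.getD i 0))) i V.length
      (List.mem_range.mp hi) acc
  rw [hA]
  apply List.ext_getElem?
  intro k
  rw [pv_fold_modify_get?]
  by_cases hk : k < V.length
  · rw [if_pos hk, List.getElem?_map, List.getElem?_range hk]
    simp only [List.getElem?_replicate, hk, if_pos, Option.map_some]
    exact congrArg some (pv_set_replicate _ _ _ hk)
  · rw [if_neg hk, List.getElem?_map]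
    have h1 : (List.range V.length)[k]? = none := by
      simp; omega
    have h2 : (List.replicate V.length (List.replicate V.length (0:Int)))[k]? = none := by
      simp; omega
    rw [h1, h2]; rfl
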